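-- pv_equiv track=rewrite | github.com/NickHugi/PyKotor | scripts/k_batchpatcher/__main__.py | visual_length
-- ===== SOURCE A (Python) =====
-- def visual_length(s: str, tab_length=8) -> int:
--     if "\t" not in s:
--         return len(s)
--
--     # Split the string at tabs, sum the lengths of the substrings,
--     # and add the necessary spaces to account for the tab stops.
--     parts = s.split("\t")
--     vis_length = sum(len(part) for part in parts)
--     for part in parts[:-1]:  # all parts except the last one
--         vis_length += tab_length - (len(part) % tab_length)
--     return vis_length
-- ===== SOURCE B (Python) =====
-- def visual_length(s: str, tab_length=8) -> int:
--     # Single left-to-right scan maintaining the running column; each tab jumps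
--     # to the next tab stop. No split, no second pass.
--     col = 0
--     for ch in s:
--         if ch == "\t":
--             col += tab_length - (col % tab_length)
--         else:
--             col += 1
--     return col
-- ===== Notes on version B (the rewrite author's own statement) =====
-- stated objective: simpler
-- what changed: Replaced split-into-parts plus a sum and a second per-part tab-stop pass by one left-to-right character scan maintaining a running column counter.
import Mathlib
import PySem

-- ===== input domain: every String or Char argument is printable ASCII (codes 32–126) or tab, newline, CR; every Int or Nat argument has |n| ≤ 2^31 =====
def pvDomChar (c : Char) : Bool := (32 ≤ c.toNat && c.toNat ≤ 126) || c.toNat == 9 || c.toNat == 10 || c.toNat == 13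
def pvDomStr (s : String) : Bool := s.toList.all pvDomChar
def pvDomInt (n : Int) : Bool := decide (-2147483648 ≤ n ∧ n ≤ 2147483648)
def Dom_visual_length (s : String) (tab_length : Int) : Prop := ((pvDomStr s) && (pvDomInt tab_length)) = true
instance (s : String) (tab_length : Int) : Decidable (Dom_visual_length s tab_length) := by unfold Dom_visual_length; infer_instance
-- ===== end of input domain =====

-- B replaces A's split + sum + second per-part pass by one running-column scan (objective: simpler).

-- ===== PORT A =====
def visual_length (s : String) (tab_length : Int) : Int :=
  if PySem.Str.isIn "\t" s = false then (PySem.Str.len s : Int)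
  else
    let parts := PySem.Chars.splitOn s.toList "\t".toList
    let vis_length : Int := (parts.map (fun p => (p.length : Int))).sum
    (PySem.List.slice parts none (some (-1))).foldl
      (fun acc p => acc + (tab_length - PySem.Int.mod (p.length : Int) tab_length)) vis_length

-- ===== PORT B =====
def visual_length_alt (s : String) (tab_length : Int) : Int :=
  s.toList.foldl
    (fun col c =>
      if c = '\t' then col + (tab_length - PySem.Int.mod col tab_length) else col + 1) 0

-- ===== PRECONDITION & SPEC =====
-- Pre_ excludes exactly the ZeroDivisionError inputs: tab_length = 0 with a tab present.
def Pre_visual_length (s : String) (tab_length : Int) : Prop :=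
  PySem.Str.isIn "\t" s = true → tab_length ≠ 0
instance (s : String) (tab_length : Int) : Decidable (Pre_visual_length s tab_length) := by
  unfold Pre_visual_length; infer_instance
def pvWitness_visual_length : String × Int := ("a\tbc", 4)

def Spec_visual_length (s : String) (tab_length : Int) (out : Int) : Prop := out = visual_length_alt s tab_length
instance (s : String) (tab_length : Int) (out : Int) : Decidable (Spec_visual_length s tab_length out) := by unfold Spec_visual_length; infer_instance

-- ===== CLAIM (what is proved, stated in full; the proofs are below) =====
def Claim_equal_visual_length : Prop := ∀ (s : String) (tab_length : Int), Dom_visual_length s tab_length → Pre_visual_length s tab_length → Spec_visual_length s tab_length (visual_length s tab_length)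

-- ===== LEMMAS AND PROOFS =====

-- parts of cs split at '\t', with a reversed current-chunk accumulator (mirrors splitOn.go)
def pvParts : List Char → List Char → List (List Char)
  | [], cur => [cur.reverse]
  | c :: rest, cur => if c = '\t' then cur.reverse :: pvParts rest [] else pvParts rest (c :: cur)

-- A's value as a function of the parts list
def pvVal (t : Int) : List (List Char) → Int
  | [] => 0
  | p :: ps =>
    if ps = [] then (p.length : Int)
    else (p.length : Int) + (t - PySem.Int.mod (p.length : Int) t) + pvVal t ps

theorem pvParts_ne_nil (cs cur : List Char) : pvParts cs cur ≠ [] := by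
  induction cs generalizing cur with
  | nil => simp [pvParts]
  | cons c rest ih => simp only [pvParts]; split <;> simp [ih]

theorem pv_go_eq (l : List Char) (fuel : Nat) (cur : List Char) (acc : List (List Char))
    (h : l.length < fuel) :
    PySem.Chars.splitOn.go ['\t'] fuel l cur acc = acc.reverse ++ pvParts l cur := by
  induction l generalizing fuel cur acc with
  | nil =>
    cases fuel with
    | zero => omega
    | succ f => simp [PySem.Chars.splitOn.go, pvParts]
  | cons c rest ih =>
    cases fuel with
    | zero => omega
    | succ f =>
      simp only [PySem.Chars.splitOn.go]
      by_cases hc : c = '\t'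
      · subst hc
        rw [if_pos (by simp [List.isPrefixOf])]
        simp only [List.length_singleton, List.drop_one, List.tail_cons]
        rw [ih f [] (List.reverse cur :: acc) (by simp at h ⊢; omega)]
        simp [pvParts]
      · rw [if_neg (by simp [List.isPrefixOf]; exact fun h' => hc h'.symm)]
        rw [ih f (c :: cur) acc (by simp at h ⊢; omega)]
        simp [pvParts, hc]

theorem pv_splitOn_eq (cs : List Char) :
    PySem.Chars.splitOn cs ['\t'] = pvParts cs [] := by
  unfold PySem.Chars.splitOn
  rw [pv_go_eq cs (cs.length + 1) [] [] (by omega)]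
  simp

-- Python mod with a fixed divisor only depends on the argument modulo the divisor
theorem pv_mod_congr (a b t : Int) (ht : t ≠ 0) (h : t ∣ a - b) :
    PySem.Int.mod a t = PySem.Int.mod b t := by
  have ha := PySem.Int.floordiv_mul_add_mod a t
  have hb := PySem.Int.floordiv_mul_add_mod b t
  obtain ⟨k, hk⟩ : t ∣ PySem.Int.mod a t - PySem.Int.mod b t := by
    obtain ⟨m, hm⟩ := h
    exact ⟨m - (PySem.Int.floordiv a t - PySem.Int.floordiv b t), by ring_nf; nlinarith [hm]⟩
  rcases lt_trichotomy t 0 with hneg | hz | hpos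
  · have b1 := PySem.Int.mod_neg_bounds (a := a) hneg
    have b2 := PySem.Int.mod_neg_bounds (a := b) hneg
    have hk0 : k = 0 := by nlinarith
    subst hk0
    simp at hk
    omega
  · exact absurd hz ht
  · have b1l := PySem.Int.mod_nonneg (a := a) hpos
    have b1r := PySem.Int.mod_lt (a := a) hpos
    have b2l := PySem.Int.mod_nonneg (a := b) hpos
    have b2r := PySem.Int.mod_lt (a := b) hpos
    have hk0 : k = 0 := by nlinarith
    subst hk0
    simp at hk
    omega

-- the B-side scan
def pvScan (t : Int) (cs : List Char) (col : Int) : Int :=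
  cs.foldl (fun col c => if c = '\t' then col + (t - PySem.Int.mod col t) else col + 1) col

theorem pvScan_tab (t : Int) (rest : List Char) (col : Int) :
    pvScan t ('\t' :: rest) col = pvScan t rest (col + (t - PySem.Int.mod col t)) := by
  simp [pvScan]

theorem pvScan_other (t : Int) (c : Char) (rest : List Char) (col : Int) (hc : ¬ c = '\t') :
    pvScan t (c :: rest) col = pvScan t rest (col + 1) := by
  simp [pvScan, hc]

theorem pv_scan_eq (t : Int) (ht : t ≠ 0) (cs : List Char) :
    ∀ (cur : List Char) (col : Int),
      PySem.Int.mod col t = PySem.Int.mod (cur.length : Int) t →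
      pvScan t cs col = col - cur.length + pvVal t (pvParts cs cur) := by
  induction cs with
  | nil => intro cur col h; simp [pvScan, pvParts, pvVal]
  | cons c rest ih =>
    intro cur col h
    by_cases hc : c = '\t'
    · subst hc
      rw [pvScan_tab]
      have hdvd : t ∣ (col + (t - PySem.Int.mod col t)) - 0 := by
        have := PySem.Int.floordiv_mul_add_mod col t
        exact ⟨PySem.Int.floordiv col t + 1, by linarith⟩
      have hmod0 : PySem.Int.mod (col + (t - PySem.Int.mod col t)) t = PySem.Int.mod 0 t :=
        pv_mod_congr _ _ _ ht hdvd
      have hz : PySem.Int.mod (0 : Int) t = 0 := (PySem.Int.mod_eq_zero_iff_dvd 0 t).mpr (dvd_zero t)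
      rw [ih [] (col + (t - PySem.Int.mod col t)) (by simp [hmod0, hz])]
      simp only [pvParts]
      simp only [if_true]
      have hne := pvParts_ne_nil rest ([] : List Char)
      simp only [pvVal]
      rw [if_neg hne]
      simp only [List.length_reverse, List.length_nil]
      rw [← h]
      push_cast
      ring
    · rw [pvScan_other t c rest col hc]
      have hcong : PySem.Int.mod (col + 1) t = PySem.Int.mod ((cur.length : Int) + 1) t := by
        apply pv_mod_congr _ _ _ ht
        have hdc : t ∣ col - (cur.length : Int) := by
          obtain ⟨k, hk⟩ : t ∣ PySem.Int.mod col t - PySem.Int.mod (cur.length : Int) t := by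
            rw [h]; simp
          have ha := PySem.Int.floordiv_mul_add_mod col t
          have hb := PySem.Int.floordiv_mul_add_mod (cur.length : Int) t
          exact ⟨PySem.Int.floordiv col t - PySem.Int.floordiv (cur.length : Int) t + k, by linarith⟩
        obtain ⟨k, hk⟩ := hdc
        exact ⟨k, by omega⟩
      rw [ih (c :: cur) (col + 1) (by simpa using hcong)]
      simp only [pvParts, if_neg hc, List.length_cons]
      push_cast
      ring

theorem pv_scan_no_tab (t : Int) (cs : List Char) (h : '\t' ∉ cs) :
    ∀ col : Int, pvScan t cs col = col + cs.length := by
  induction cs with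
  | nil => intro col; simp [pvScan]
  | cons c rest ih =>
    intro col
    simp only [List.mem_cons, not_or] at h
    rw [pvScan_other t c rest col (fun hcc => h.1 hcc.symm)]
    rw [ih h.2 (col + 1)]
    simp only [List.length_cons]
    push_cast
    ring

theorem pv_aval_eq (t : Int) (parts : List (List Char)) (hne : parts ≠ []) (init : Int) :
    parts.dropLast.foldl (fun acc p => acc + (t - PySem.Int.mod (p.length : Int) t))
        (init + (parts.map (fun p => (p.length : Int))).sum)
      = init + pvVal t parts := by
  induction parts generalizing init with
  | nil => exact absurd rfl hne
  | cons p ps ih =>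
    by_cases hps : ps = []
    · subst hps; simp [pvVal]
    · have hd : (p :: ps).dropLast = p :: ps.dropLast := by
        cases ps with
        | nil => exact absurd rfl hps
        | cons q qs => simp
      rw [hd]
      simp only [List.foldl_cons, List.map_cons, List.sum_cons]
      rw [show init + ((p.length : Int) + (ps.map (fun p => (p.length : Int))).sum) +
            (t - PySem.Int.mod (p.length : Int) t)
          = (init + (p.length : Int) + (t - PySem.Int.mod (p.length : Int) t)) +
            (ps.map (fun p => (p.length : Int))).sum by ring]
      rw [ih hps (init + (p.length : Int) + (t - PySem.Int.mod (p.length : Int) t))]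
      simp only [pvVal]
      rw [if_neg hps]
      ring

-- ===== VERDICT (by name: the statement is the Claim_ definition above) =====
theorem visual_length_spec : Claim_equal_visual_length := by
  intro s t _hdom hpre
  unfold Spec_visual_length
  have halt : visual_length_alt s t = pvScan t s.toList 0 := rfl
  by_cases htab : PySem.Str.isIn "\t" s = true
  · have ht : t ≠ 0 := hpre htab
    have hv : visual_length s t
        = (PySem.List.slice (pvParts s.toList []) none (some (-1))).foldl
            (fun acc p => acc + (t - PySem.Int.mod (p.length : Int) t))
            (((pvParts s.toList []).map (fun p => (p.length : Int))).sum) := by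
      unfold visual_length
      rw [if_neg (fun hf => by rw [hf] at htab; cases htab)]
      rw [show "\t".toList = ['\t'] from rfl, pv_splitOn_eq]
    rw [hv, halt, PySem.List.slice_to_neg_one]
    have hscan := pv_scan_eq t ht s.toList [] 0 (by simp)
    have hA := pv_aval_eq t (pvParts s.toList []) (pvParts_ne_nil _ _) 0
    simp only [List.length_nil, Nat.cast_zero, sub_zero, zero_add] at hscan hA
    rw [hA, hscan]
  · have hfalse : PySem.Str.isIn "\t" s = false := by
      simp only [Bool.not_eq_true] at htab; exact htab
    unfold visual_length
    rw [if_pos hfalse, halt]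
    have hmem : '\t' ∉ s.toList := by
      intro hm
      have hinf : ("\t".toList) <:+: s.toList := by
        rw [show "\t".toList = ['\t'] from rfl]
        exact (List.singleton_infix_iff '\t' s.toList).mpr hm
      rw [(PySem.Str.isIn_iff_infix "\t" s).mpr hinf] at hfalse
      cases hfalse
    rw [pv_scan_no_tab t s.toList hmem 0]
    simp [PySem.Str.len]
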